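-- pv_equiv track=rewrite | github.com/mayurrathi/awesome-agent-skills | scripts/build_github_directory.py | generate_readme_table
-- ===== SOURCE A (Python) =====
-- from collections import defaultdict
--
-- def generate_readme_table(skills):
--     # Group skills by category
--     categories = defaultdict(list)
--     for skill in skills:
--         cat = skill.get('category', 'Uncategorized')
--         categories[cat].append(skill)
--
--     sorted_categories = sorted(categories.keys())
--
--     markdown_lines = []
--
--     for category in sorted_categories:
--         markdown_lines.append(f"### 🤖 {category}")
--         markdown_lines.append(f"<details><summary>View {len(categories[category])} Skills <i>(Click to expand)</i></summary>")
--         markdown_lines.append("")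
--
--         cat_skills = sorted(categories[category], key=lambda x: x.get('name', ''))
--
--         for skill in cat_skills:
--             name = skill.get('name', '')
--             desc = skill.get('description', '').replace('\n', ' ')
--             if len(desc) > 120:
--                 desc = desc[:117] + "..."
--             skill_id = skill.get('id', '')
--
--             markdown_lines.append(f"#### `{skill_id}`")
--             markdown_lines.append(f"*{name}* - {desc}")
--             markdown_lines.append("```bash")
--             markdown_lines.append(f"npx skills add mayurrathi/awesome-agent-skills --skill {skill_id}")
--             markdown_lines.append("```")
--             markdown_lines.append("---")
--             markdown_lines.append("")
--
--         markdown_lines.append("</details>")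
--         markdown_lines.append("")
--
--     return "\n".join(markdown_lines)
-- ===== SOURCE B (Python) =====
-- def generate_readme_table(skills):
--     def cat_of(s):
--         return s.get('category', 'Uncategorized')
--
--     def block(s):
--         name = s.get('name', '')
--         desc = s.get('description', '').replace('\n', ' ')
--         if len(desc) > 120:
--             desc = desc[:117] + "..."
--         skill_id = s.get('id', '')
--         return [
--             f"#### `{skill_id}`",
--             f"*{name}* - {desc}",
--             "```bash",
--             f"npx skills add mayurrathi/awesome-agent-skills --skill {skill_id}",
--             "```",
--             "---",
--             "",
--         ]
--
--     def section(category):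
--         group = sorted((s for s in skills if cat_of(s) == category),
--                        key=lambda s: s.get('name', ''))
--         return ([f"### 🤖 {category}",
--                  f"<details><summary>View {len(group)} Skills <i>(Click to expand)</i></summary>",
--                  ""]
--                 + [line for s in group for line in block(s)]
--                 + ["</details>", ""])
--
--     return "\n".join(line
--                      for category in sorted({cat_of(s) for s in skills})
--                      for line in section(category))
-- ===== Notes on version B (the rewrite author's own statement) =====
-- stated objective: simpler
-- what changed: B drops A's defaultdict grouping pass and mutable lines accumulator: it derives the sorted category list from a set of category keys, rebuilds each group with a filter + sort, and emits each section as a pure list expression joined by a single flat generator.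
import Mathlib
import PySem

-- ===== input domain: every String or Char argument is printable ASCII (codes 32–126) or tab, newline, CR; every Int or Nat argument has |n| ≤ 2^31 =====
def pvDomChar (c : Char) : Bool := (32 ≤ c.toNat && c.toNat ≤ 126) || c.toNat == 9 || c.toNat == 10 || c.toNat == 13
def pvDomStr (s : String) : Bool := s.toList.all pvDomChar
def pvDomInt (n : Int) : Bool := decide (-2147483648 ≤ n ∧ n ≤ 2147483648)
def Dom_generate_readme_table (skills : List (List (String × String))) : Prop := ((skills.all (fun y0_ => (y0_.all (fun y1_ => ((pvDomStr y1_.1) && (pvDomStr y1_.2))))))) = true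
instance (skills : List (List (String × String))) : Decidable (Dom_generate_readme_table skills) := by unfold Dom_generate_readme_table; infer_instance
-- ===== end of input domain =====

-- B replaces A's defaultdict grouping pass with sorted(set(categories)) plus a per-category
-- filter and a single flat comprehension (objective: simpler decomposition, no dict state).

-- shared primitive: skill.get(key, default) on the skill dict
def pvSkGet (skill : List (String × String)) (k dflt : String) : String :=
  (PySem.Dict.mk skill).getD k dflt

-- the seven lines emitted for one skill (identical text in A and B)
def pvSkillBlock (skill : List (String × String)) : List String :=
  let name := pvSkGet skill "name" ""
  let desc0 := PySem.Str.replace (pvSkGet skill "description" "") "\n" " "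
  let desc := if 120 < PySem.Str.len desc0
    then PySem.Str.slice desc0 none (some 117) ++ "..." else desc0
  let skill_id := pvSkGet skill "id" ""
  [ "#### `" ++ skill_id ++ "`",
    "*" ++ name ++ "* - " ++ desc,
    "```bash",
    "npx skills add mayurrathi/awesome-agent-skills --skill " ++ skill_id,
    "```",
    "---",
    "" ]

-- ===== PORT A =====
def generate_readme_table (skills : List (List (String × String))) : String :=
  -- categories = defaultdict(list); for skill in skills: categories[cat].append(skill)
  let categories : PySem.Dict String (List (List (String × String))) :=
    skills.foldl (fun d skill =>
      d.modify (pvSkGet skill "category" "Uncategorized") [] (· ++ [skill])) PySem.Dict.empty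
  let sorted_categories := PySem.List.sorted categories.keys (fun c => c) false
  let markdown_lines := sorted_categories.foldl (fun acc category =>
    let acc := acc ++ ["### 🤖 " ++ category]
    let acc := acc ++ ["<details><summary>View " ++
      PySem.Int.toStr ((categories.getD category []).length : Int) ++
      " Skills <i>(Click to expand)</i></summary>"]
    let acc := acc ++ [""]
    let cat_skills := PySem.List.sorted (categories.getD category [])
      (fun x => pvSkGet x "name" "") false
    let acc := cat_skills.foldl (fun acc2 skill => acc2 ++ pvSkillBlock skill) acc
    acc ++ ["</details>", ""]) []
  PySem.Str.join "\n" markdown_lines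

-- ===== PORT B =====
def pvSection (skills : List (List (String × String))) (category : String) : List String :=
  let group := PySem.List.sorted
    (skills.filter (fun s => pvSkGet s "category" "Uncategorized" == category))
    (fun s => pvSkGet s "name" "") false
  ["### 🤖 " ++ category,
   "<details><summary>View " ++ PySem.Int.toStr (group.length : Int) ++
     " Skills <i>(Click to expand)</i></summary>",
   ""]
  ++ group.flatMap pvSkillBlock
  ++ ["</details>", ""]

def generate_readme_table_alt (skills : List (List (String × String))) : String :=
  let cats := PySem.List.sorted
    (PySem.Set.ofList (skills.map (fun s => pvSkGet s "category" "Uncategorized")))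
    (fun c => c) false
  PySem.Str.join "\n" (cats.flatMap (pvSection skills))

-- ===== PRECONDITION & SPEC =====
def Spec_generate_readme_table (skills : List (List (String × String))) (out : String) : Prop := out = generate_readme_table_alt skills
instance (skills : List (List (String × String))) (out : String) : Decidable (Spec_generate_readme_table skills out) := by unfold Spec_generate_readme_table; infer_instance

-- ===== CLAIM (what is proved, stated in full; the proofs are below) =====
def Claim_equal_generate_readme_table : Prop := ∀ (skills : List (List (String × String))), Dom_generate_readme_table skills → Spec_generate_readme_table skills (generate_readme_table skills)

-- ===== LEMMAS AND PROOFS =====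

-- A's grouping dict looked up at any category c is the filter of skills by that category
lemma pvGroup_getD (skills : List (List (String × String))) (c : String) :
    ((skills.foldl (fun d skill =>
        d.modify (pvSkGet skill "category" "Uncategorized") [] (· ++ [skill]))
        (PySem.Dict.empty : PySem.Dict String (List (List (String × String))))).getD c [])
    = skills.filter (fun s => pvSkGet s "category" "Uncategorized" == c) := by
  rw [show (skills.foldl (fun d skill =>
        d.modify (pvSkGet skill "category" "Uncategorized") [] (· ++ [skill]))
        (PySem.Dict.empty : PySem.Dict String (List (List (String × String)))))
      = ((skills.map (fun s => (pvSkGet s "category" "Uncategorized", s))).foldl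
          (fun d p => d.modify p.1 [] (· ++ [p.2])) PySem.Dict.empty) from
    (List.foldl_map (f := fun s => (pvSkGet s "category" "Uncategorized", s))
      (g := fun d p => d.modify p.1 [] (· ++ [p.2])) (l := skills)
      (init := PySem.Dict.empty)).symm]
  rw [PySem.Dict.getD_foldl_modify_append]
  simp [List.filter_map, Function.comp_def]

-- A's dict keys are the distinct categories in first-occurrence order
lemma pvGroup_keys (skills : List (List (String × String))) :
    (skills.foldl (fun d skill =>
        d.modify (pvSkGet skill "category" "Uncategorized") [] (· ++ [skill]))
        (PySem.Dict.empty : PySem.Dict String (List (List (String × String))))).keys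
    = PySem.Set.ofList (skills.map (fun s => pvSkGet s "category" "Uncategorized")) := by
  rw [PySem.Dict.keys_foldl_modify_key skills
        (fun s => pvSkGet s "category" "Uncategorized") [] (fun _ skill => (· ++ [skill]))]
  simp [PySem.Set.update, PySem.Set.ofList_eq_foldl]

-- ===== VERDICT (by name: the statement is the Claim_ definition above) =====
theorem generate_readme_table_spec : Claim_equal_generate_readme_table := by
  intro skills _
  unfold Spec_generate_readme_table generate_readme_table generate_readme_table_alt
  simp only [pvGroup_getD, pvGroup_keys, PySem.List.foldl_append_eq_flatMap,
    List.append_assoc, List.nil_append]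
  congr 1
  congr 1
  funext c
  simp [pvSection, PySem.List.length_sorted]
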